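-- pv_equiv track=rewrite | github.com/yashitanamdeo/geeks-for-geeks | medium/top_k_numbers_in_a_stream/solution.py | kTop
-- ===== SOURCE A (Python) =====
-- def kTop(a, N, K):
--     # code here.
--     d = {}
--     res = []
--     for i in range(N):
--         d[a[i]] = d.get(a[i], 0)+1
--         q = sorted(d.items(), key=lambda x: (x[1], -x[0]), reverse=1)
--         if len(q) < K:
--             res.append([j for j, _ in q])
--         else:
--             res.append([j for j, _ in q[:K]])
--     return res
-- ===== SOURCE B (Python) =====
-- def kTop(a, N, K):
--     # Incremental: keep `order` = values sorted by (count desc, value asc);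
--     # each step only the updated element is removed and reinserted by a linear scan.
--     cnt = {}
--     order = []
--     res = []
--     for i in range(N):
--         x = a[i]
--         c = cnt.get(x, 0) + 1
--         cnt[x] = c
--         if c > 1:
--             order.remove(x)
--         j = 0
--         while j < len(order):
--             y = order[j]
--             cy = cnt[y]
--             if cy < c or (cy == c and x < y):
--                 break
--             j += 1
--         order.insert(j, x)
--         res.append(order[:K])
--     return res
-- ===== Notes on version B (the rewrite author's own statement) =====
-- stated objective: faster
-- what changed: Instead of re-sorting the whole counts dict at every stream step, B maintains the value list already sorted by (count desc, value asc) and at each step removes just the updated element and reinserts it by one linear scan.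
import Mathlib
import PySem

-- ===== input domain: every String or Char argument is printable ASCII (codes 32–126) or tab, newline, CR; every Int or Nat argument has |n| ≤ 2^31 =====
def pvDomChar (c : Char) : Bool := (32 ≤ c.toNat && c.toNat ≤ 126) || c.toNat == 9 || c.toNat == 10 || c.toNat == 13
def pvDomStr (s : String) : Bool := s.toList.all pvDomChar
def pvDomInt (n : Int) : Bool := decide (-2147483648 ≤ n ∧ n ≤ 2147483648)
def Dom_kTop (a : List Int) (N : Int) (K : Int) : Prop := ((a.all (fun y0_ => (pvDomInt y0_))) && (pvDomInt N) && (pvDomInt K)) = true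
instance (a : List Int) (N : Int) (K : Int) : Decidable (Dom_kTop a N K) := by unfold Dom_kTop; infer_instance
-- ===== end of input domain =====

-- B replaces A's per-step full sort of the counts dict by an incrementally maintained
-- sorted list (remove the one updated element, reinsert it with a linear scan).

-- ===== PORT A =====
-- Python's tuple sort key (x[1], -x[0]) is lexicographic: ported as a key into Lex (Int × Int).
def kTopKey (p : Int × Int) : Lex (Int × Int) := toLex (p.2, -p.1)

def kTopStep (a : List Int) (K : Int) (st : PySem.Dict Int Int × List (List Int)) (i : Int) :
    PySem.Dict Int Int × List (List Int) :=
  match PySem.List.pyGet? a i with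
  | none => st   -- a[i] would raise IndexError: excluded by Pre_kTop
  | some x =>
    let d := st.1.insert x (st.1.getD x 0 + 1)
    let q := PySem.List.sorted d.items kTopKey true
    if (q.length : Int) < K then (d, st.2 ++ [q.map (·.1)])
    else (d, st.2 ++ [(PySem.List.slice q none (some K)).map (·.1)])

def kTop (a : List Int) (N : Int) (K : Int) : List (List Int) :=
  ((PySem.List.pyRange 0 N 1).foldl (kTopStep a K) (PySem.Dict.empty, [])).2

-- ===== PORT B =====
-- the `while j < len(order) … order.insert(j, x)` scan of Source B, as a structural recursion;
-- cnt[y] is ported as getD (KeyError is impossible: every y in order is a key of cnt)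
def kTopIns (cnt : PySem.Dict Int Int) (c x : Int) : List Int → List Int
  | [] => [x]
  | y :: t =>
    let cy := cnt.getD y 0
    if cy < c ∨ (cy = c ∧ x < y) then x :: y :: t else y :: kTopIns cnt c x t

def kTopAltStep (a : List Int) (K : Int) (st : PySem.Dict Int Int × List Int × List (List Int)) (i : Int) :
    PySem.Dict Int Int × List Int × List (List Int) :=
  match PySem.List.pyGet? a i with
  | none => st   -- a[i] would raise IndexError: excluded by Pre_kTop
  | some x =>
    let c := st.1.getD x 0 + 1
    let cnt := st.1.insert x c
    -- order.remove(x) runs only when c > 1; x is then present, so remove? never yields none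
    let order1 := if 1 < c then (PySem.List.remove? st.2.1 x).getD st.2.1 else st.2.1
    let order2 := kTopIns cnt c x order1
    (cnt, order2, st.2.2 ++ [PySem.List.slice order2 none (some K)])

def kTop_alt (a : List Int) (N : Int) (K : Int) : List (List Int) :=
  ((PySem.List.pyRange 0 N 1).foldl (kTopAltStep a K) (PySem.Dict.empty, [], [])).2.2

-- ===== PRECONDITION & SPEC =====
-- A (and B) raise IndexError at a[i] when N > len(a); exactly those inputs are excluded.
def Pre_kTop (a : List Int) (N : Int) (K : Int) : Prop := N ≤ (a.length : Int)
instance (a : List Int) (N : Int) (K : Int) : Decidable (Pre_kTop a N K) := by unfold Pre_kTop; infer_instance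

def pvWitness_kTop : List Int × Int × Int := ([3, 1, 3, 2, 1, 3], 6, 2)

def Spec_kTop (a : List Int) (N : Int) (K : Int) (out : List (List Int)) : Prop := out = kTop_alt a N K
instance (a : List Int) (N : Int) (K : Int) (out : List (List Int)) : Decidable (Spec_kTop a N K out) := by unfold Spec_kTop; infer_instance

-- ===== CLAIM (what is proved, stated in full; the proofs are below) =====
def Claim_equal_kTop : Prop := ∀ (a : List Int) (N : Int) (K : Int), Dom_kTop a N K → Pre_kTop a N K → Spec_kTop a N K (kTop a N K)

-- ===== LEMMAS AND PROOFS =====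

-- key of a value under the current counts
def kTopKeyV (d : PySem.Dict Int Int) (v : Int) : Lex (Int × Int) := toLex (d.getD v 0, -v)

-- loop invariant: order lists exactly the keys of d, strictly descending under kTopKeyV, counts ≥ 1
def kTopInv (d : PySem.Dict Int Int) (order : List Int) : Prop :=
  d.keys.Nodup ∧ order.Perm d.keys ∧
  order.Pairwise (fun u v => kTopKeyV d v < kTopKeyV d u) ∧
  ∀ v ∈ d.keys, 1 ≤ d.getD v 0

theorem kTopIns_perm (cnt : PySem.Dict Int Int) (c x : Int) (L : List Int) :
    (kTopIns cnt c x L).Perm (x :: L) := by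
  induction L with
  | nil => simp [kTopIns]
  | cons y t ih =>
    simp only [kTopIns]
    split
    · exact List.Perm.refl _
    · exact (List.Perm.cons y ih).trans (List.Perm.swap x y t)

theorem kTopIns_mem (cnt : PySem.Dict Int Int) (c x : Int) (L : List Int) (z : Int) :
    z ∈ kTopIns cnt c x L ↔ z = x ∨ z ∈ L := by
  have := (kTopIns_perm cnt c x L).mem_iff (a := z)
  simpa using this

theorem kTopIns_pairwise (cnt : PySem.Dict Int Int) (c x : Int) (L : List Int)
    (hx : cnt.getD x 0 = c)
    (hL : L.Pairwise (fun u v => kTopKeyV cnt v < kTopKeyV cnt u))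
    (hnx : ∀ y ∈ L, y ≠ x) :
    (kTopIns cnt c x L).Pairwise (fun u v => kTopKeyV cnt v < kTopKeyV cnt u) := by
  induction L with
  | nil => simp [kTopIns]
  | cons y t ih =>
    have hyt := List.pairwise_cons.mp hL
    simp only [kTopIns]
    split
    · rename_i hcond
      -- x goes in front: key y < key x, and y dominates t
      have hyx : kTopKeyV cnt y < kTopKeyV cnt x := by
        simp only [kTopKeyV, hx, Prod.Lex.lt_iff, ofLex_toLex]
        rcases hcond with h | ⟨h1, h2⟩
        · exact Or.inl h
        · exact Or.inr ⟨h1, by omega⟩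
      refine List.pairwise_cons.mpr ⟨?_, hL⟩
      intro z hz
      rcases List.mem_cons.mp hz with rfl | hz
      · exact hyx
      · exact lt_trans (hyt.1 z hz) hyx
    · rename_i hcond
      -- y stays in front: key x < key y, recurse
      have hxy : kTopKeyV cnt x < kTopKeyV cnt y := by
        have hyx : y ≠ x := hnx y (by simp)
        have h1 : ¬ cnt.getD y 0 < c := fun h => hcond (Or.inl h)
        have h2 : cnt.getD y 0 = c → ¬ x < y := fun he hl => hcond (Or.inr ⟨he, hl⟩)
        simp only [kTopKeyV, hx, Prod.Lex.lt_iff, ofLex_toLex]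
        rcases lt_or_eq_of_le (not_lt.mp h1) with h | h
        · exact Or.inl h
        · have hxlt : ¬ x < y := h2 h.symm
          have : y ≠ x := hyx
          exact Or.inr ⟨h, by omega⟩
      refine List.pairwise_cons.mpr ⟨?_, ih hyt.2 (fun z hz => hnx z (by simp [hz]))⟩
      intro z hz
      rcases (kTopIns_mem cnt c x t z).mp hz with rfl | hz
      · exact hxy
      · exact hyt.1 z hz
  
-- the bridge: under the invariant, A's per-step sort IS B's maintained list (paired with its counts)
theorem kTop_sorted_eq (d : PySem.Dict Int Int) (order : List Int) (h : kTopInv d order) :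
    PySem.List.sorted d.items kTopKey true = order.map (fun v => (v, d.getD v 0)) := by
  obtain ⟨hnd, hperm, hpw, _⟩ := h
  apply PySem.List.sorted_rev_eq_of_perm_of_pairwise_gt
  · rw [PySem.Dict.items_eq_map_keys d hnd 0]
    exact hperm.map _
  · rw [List.pairwise_map]
    exact hpw.imp (fun {u v} h => h)

-- one step of B preserves the invariant
theorem kTop_step_inv (d : PySem.Dict Int Int) (order : List Int) (x : Int) (h : kTopInv d order) :
    kTopInv (d.insert x (d.getD x 0 + 1))
      (kTopIns (d.insert x (d.getD x 0 + 1)) (d.getD x 0 + 1) x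
        (if 1 < d.getD x 0 + 1 then (PySem.List.remove? order x).getD order else order)) := by
  obtain ⟨hnd, hperm, hpw, hpos⟩ := h
  set c := d.getD x 0 + 1 with hc
  set cnt := d.insert x c with hcnt
  have hondup : order.Nodup := hperm.nodup_iff.mpr (by exact hnd)
  have hmemiff : ∀ z, z ∈ order ↔ z ∈ d.keys := fun z => hperm.mem_iff
  have hcontains : (1 < c) ↔ d.contains x = true := by
    constructor
    · intro h1
      by_contra hnc
      have : d.contains x = false := by revert hnc; cases hd : d.contains x <;> simp
      have := PySem.Dict.getD_of_not_contains d (k := x) 0 this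
      omega
    · intro h1
      have := hpos x ((PySem.Dict.contains_iff_mem_keys d x).mp h1)
      omega
  set rem := if 1 < c then (PySem.List.remove? order x).getD order else order with hrem
  -- facts about rem
  have hremcases : (d.contains x = true ∧ rem = order.erase x) ∨
      (d.contains x = false ∧ rem = order ∧ x ∉ order) := by
    by_cases h1 : 1 < c
    · left
      have hcx := hcontains.mp h1
      have hxo : x ∈ order := (hmemiff x).mpr ((PySem.Dict.contains_iff_mem_keys d x).mp hcx)
      refine ⟨hcx, ?_⟩
      rw [hrem, if_pos h1, PySem.List.remove?_eq_some_erase order x hxo]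
      rfl
    · right
      have hcx : d.contains x = false := by
        cases hd : d.contains x
        · rfl
        · exact absurd (hcontains.mpr hd) h1
      refine ⟨hcx, by rw [hrem, if_neg h1], ?_⟩
      intro hxo
      exact absurd (hcontains.mpr ((PySem.Dict.contains_iff_mem_keys d x).mpr ((hmemiff x).mp hxo))) h1
  have hxnotrem : x ∉ rem := by
    rcases hremcases with ⟨_, hr⟩ | ⟨_, hr, hxo⟩
    · rw [hr]; exact hondup.not_mem_erase
    · rw [hr]; exact hxo
  have hremsub : rem.Sublist order := by
    rcases hremcases with ⟨_, hr⟩ | ⟨_, hr, _⟩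
    · rw [hr]; exact List.erase_sublist
    · rw [hr]
  have hremmem : ∀ z ∈ rem, z ∈ order := fun z hz => hremsub.mem hz
  -- counts are unchanged off x
  have hgetD : ∀ z, z ≠ x → cnt.getD z 0 = d.getD z 0 := by
    intro z hzx
    rw [hcnt, PySem.Dict.getD_insert]
    simp [hzx]
  have hkey : ∀ z, z ≠ x → kTopKeyV cnt z = kTopKeyV d z := by
    intro z hzx; simp [kTopKeyV, hgetD z hzx]
  have hgx : cnt.getD x 0 = c := by rw [hcnt]; exact PySem.Dict.getD_insert_self d x c 0
  -- rem is still strictly descending under cnt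
  have hrempw : rem.Pairwise (fun u v => kTopKeyV cnt v < kTopKeyV cnt u) := by
    have h1 : rem.Pairwise (fun u v => kTopKeyV d v < kTopKeyV d u) := hpw.sublist hremsub
    refine h1.imp_of_mem ?_
    intro u v hu hv huv
    rw [hkey u (by rintro rfl; exact hxnotrem hu), hkey v (by rintro rfl; exact hxnotrem hv)]
    exact huv
  have hnewpw := kTopIns_pairwise cnt c x rem hgx hrempw (fun y hy => by rintro rfl; exact hxnotrem hy)
  have hnewperm : (kTopIns cnt c x rem).Perm (x :: rem) := kTopIns_perm cnt c x rem
  refine ⟨PySem.Dict.nodup_keys_insert d x c hnd, ?_, hnewpw, ?_⟩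
  · -- permutation with the new key list
    rcases hremcases with ⟨hcx, hr⟩ | ⟨hcx, hr, hxo⟩
    · rw [hcnt, PySem.Dict.keys_insert_of_contains d c hcx]
      have hxk : x ∈ d.keys := (PySem.Dict.contains_iff_mem_keys d x).mp hcx
      refine hnewperm.trans ?_
      rw [hr]
      exact ((hperm.erase x).cons x).trans (List.perm_cons_erase hxk).symm
    · rw [hcnt, PySem.Dict.keys_insert_of_not_contains d c hcx]
      refine hnewperm.trans ?_
      rw [hr]
      exact (hperm.cons x).trans (List.perm_append_singleton x d.keys).symm
  · -- counts stay ≥ 1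
    intro v hv
    by_cases hvx : v = x
    · subst hvx
      rw [hgx]
      have : 0 ≤ d.getD v 0 := by
        cases hd : d.contains v
        · rw [PySem.Dict.getD_of_not_contains d 0 hd]
        · exact le_trans (by norm_num) (hpos v ((PySem.Dict.contains_iff_mem_keys d v).mp hd))
      omega
    · rw [hgetD v hvx]
      have hvk : v ∈ d.keys := by
        rcases (PySem.Dict.mem_keys_insert d x v c).mp (by rw [hcnt] at hv; exact hv) with h | h
        · exact absurd h hvx
        · exact h
      exact hpos v hvk

-- slicing commutes with mapping
theorem slice_to_map {α β : Type} (f : α → β) (xs : List α) (K : Int) :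
    (PySem.List.slice xs none (some K)).map f = PySem.List.slice (xs.map f) none (some K) := by
  by_cases hK : 0 ≤ K
  · rw [PySem.List.slice_to xs hK, PySem.List.slice_to (xs.map f) hK, List.map_take]
  · have hK : K < 0 := by omega
    have hk : 0 < (-K).toNat := by omega
    have hKe : K = -((-K).toNat : Int) := by omega
    rw [hKe, PySem.List.slice_to_neg_natCast xs _ hk, PySem.List.slice_to_neg_natCast (xs.map f) _ hk,
      List.map_take, List.length_map]

-- A's appended row equals B's appended row
theorem kTop_row_eq (d : PySem.Dict Int Int) (order : List Int) (K : Int) (h : kTopInv d order) :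
    (if ((PySem.List.sorted d.items kTopKey true).length : Int) < K then
        (PySem.List.sorted d.items kTopKey true).map (·.1)
      else (PySem.List.slice (PySem.List.sorted d.items kTopKey true) none (some K)).map (·.1))
      = PySem.List.slice order none (some K) := by
  rw [kTop_sorted_eq d order h]
  have hfst : (order.map (fun v => (v, d.getD v 0))).map (·.1) = order := by
    simp [List.map_map, Function.comp_def]
  rw [slice_to_map (fun p : Int × Int => p.1) (order.map (fun v => (v, d.getD v 0))) K, hfst]
  split
  · rename_i hlen
    rw [List.length_map] at hlen
    have hK : 0 ≤ K := by omega
    rw [PySem.List.slice_to order hK, List.take_of_length_le (by omega)]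
  · rfl

-- the joint loop: both folds stay related
theorem kTop_fold_rel (a : List Int) (K : Int) :
    ∀ (is : List Int), (∀ i ∈ is, 0 ≤ i ∧ i < (a.length : Int)) →
    ∀ (d : PySem.Dict Int Int) (order : List Int) (res : List (List Int)), kTopInv d order →
    (is.foldl (kTopStep a K) (d, res)).2
      = (is.foldl (kTopAltStep a K) (d, order, res)).2.2 := by
  intro is
  induction is with
  | nil => intro _ d order res _; rfl
  | cons i t ih =>
    intro hbound d order res hinv
    have hi := hbound i (by simp)
    obtain ⟨m, hmi, hmlen⟩ : ∃ m : Nat, i = (m : Int) ∧ m < a.length := ⟨i.toNat, by omega, by omega⟩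
    subst hmi
    have hgi : PySem.List.pyGet? a (m : Int) = some (a[m]'hmlen) := by
      rw [PySem.List.pyGet?_natCast]
      exact List.getElem?_eq_getElem hmlen
    set x := a[m]'hmlen with hx
    have hstepA : kTopStep a K (d, res) ((m : Nat) : Int) =
        (d.insert x (d.getD x 0 + 1),
         res ++ [PySem.List.slice (kTopIns (d.insert x (d.getD x 0 + 1)) (d.getD x 0 + 1) x
            (if 1 < d.getD x 0 + 1 then (PySem.List.remove? order x).getD order else order)) none (some K)]) := by
      simp only [kTopStep, hgi]
      have := kTop_row_eq (d.insert x (d.getD x 0 + 1))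
        (kTopIns (d.insert x (d.getD x 0 + 1)) (d.getD x 0 + 1) x
          (if 1 < d.getD x 0 + 1 then (PySem.List.remove? order x).getD order else order)) K
        (kTop_step_inv d order x hinv)
      split <;> rename_i hc
      · rw [if_pos hc] at this; rw [this]
      · rw [if_neg hc] at this; rw [this]
    have hstepB : kTopAltStep a K (d, order, res) ((m : Nat) : Int) =
        (d.insert x (d.getD x 0 + 1),
         kTopIns (d.insert x (d.getD x 0 + 1)) (d.getD x 0 + 1) x
            (if 1 < d.getD x 0 + 1 then (PySem.List.remove? order x).getD order else order),
         res ++ [PySem.List.slice (kTopIns (d.insert x (d.getD x 0 + 1)) (d.getD x 0 + 1) x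
            (if 1 < d.getD x 0 + 1 then (PySem.List.remove? order x).getD order else order)) none (some K)]) := by
      simp only [kTopAltStep, hgi]
    rw [List.foldl_cons, List.foldl_cons, hstepA, hstepB]
    exact ih (fun j hj => hbound j (by simp [hj])) _ _ _ (kTop_step_inv d order x hinv)

theorem kTopInv_empty : kTopInv PySem.Dict.empty [] := by
  refine ⟨?_, ?_, ?_, ?_⟩ <;> simp [PySem.Dict.empty, PySem.Dict.keys]

-- ===== VERDICT (by name: the statement is the Claim_ definition above) =====
theorem kTop_spec : Claim_equal_kTop := by
  intro a N K _ hpre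
  unfold Spec_kTop kTop kTop_alt
  apply kTop_fold_rel a K (PySem.List.pyRange 0 N 1) ?_ PySem.Dict.empty [] [] kTopInv_empty
  intro i hi
  have := (PySem.List.mem_pyRange_one).mp hi
  exact ⟨this.1, lt_of_lt_of_le this.2 hpre⟩
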